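-- pv_equiv track=rewrite | github.com/rugenl/zabbix-api-examples | change_bad_macro_items.py | replace_with_list_index
-- ===== SOURCE A (Python) =====
-- def replace_with_list_index(text, lst):
--     result = ''
--     while "$" in text:
--         i = text.index("$")
--         j = i + 1
--         num = ''
--         while j < len(text) and text[j].isdigit():
--             num += text[j]
--             j += 1
--         num = int(num)
--         result += text[:i]
--         result += lst[num-1]
--         text = text[j:]
--     result += text
--     return result
-- ===== SOURCE B (Python) =====
-- def replace_with_list_index(text, lst):
--     out = []
--     i = 0
--     n = len(text)
--     while i < n:
--         if text[i] == '$':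
--             j = i + 1
--             while j < n and text[j].isdigit():
--                 j += 1
--             out.append(lst[int(text[i + 1:j]) - 1])
--             i = j
--         else:
--             out.append(text[i])
--             i += 1
--     return ''.join(out)
-- ===== Notes on version B (the rewrite author's own statement) =====
-- stated objective: alternative
-- what changed: Replaces A's repeated find-'$'/slice/rebuild-the-string loop with a single left-to-right index scan that appends output pieces to a list and joins once at the end; it trades A's C-level slicing for a one-pass char-indexed scan.
import Mathlib
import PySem

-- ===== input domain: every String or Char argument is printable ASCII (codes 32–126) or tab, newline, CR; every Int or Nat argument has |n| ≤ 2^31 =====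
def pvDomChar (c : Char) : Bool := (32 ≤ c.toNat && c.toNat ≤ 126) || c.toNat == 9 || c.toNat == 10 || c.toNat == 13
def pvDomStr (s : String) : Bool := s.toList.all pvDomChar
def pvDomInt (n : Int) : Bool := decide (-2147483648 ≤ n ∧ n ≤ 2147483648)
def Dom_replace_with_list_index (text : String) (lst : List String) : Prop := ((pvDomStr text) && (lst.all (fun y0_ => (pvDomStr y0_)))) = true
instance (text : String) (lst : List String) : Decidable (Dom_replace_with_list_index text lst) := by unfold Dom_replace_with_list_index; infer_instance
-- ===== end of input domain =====

-- B replaces A's repeated substring-search/slice/concatenate loop by a single left-to-right scan.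
-- Where Python A raises (a '$' with no following digit, or an index outside lst), B raises too;
-- those inputs are excluded by Pre_ and the ports return a harmless default there (outside the claim).

-- ===== PORT A =====
-- A's while loop: find '$' (membership test + .index combined as a match on index?),
-- scan the digit run, append text[:i] and lst[num-1] to result, continue on text[j:].
def pvLoopA (text : List Char) (lst : List String) (result : List Char) : List Char :=
  match h : PySem.List.index? text '$' with
  | none => result ++ text                -- "$" not in text: result += text; return
  | some i =>
      let ds := (text.drop (i+1)).takeWhile PySem.Chars.isdigit   -- inner while: num += text[j]
      let num : Int := (PySem.Int.ofChars? ds).getD 0             -- int(num); none = ValueError, outside Pre_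
      pvLoopA (text.drop (i + 1 + ds.length)) lst
        (result ++ text.take i ++ ((PySem.List.pyGet? lst (num - 1)).getD "").toList)
        -- pyGet? none = IndexError, outside Pre_
termination_by text.length
decreasing_by
  have hm : '$' ∈ text := by
    obtain ⟨pre, suf, hcs, -, -⟩ := (PySem.List.index?_eq_some_iff text '$' i).mp h
    simp [hcs]
  have : text ≠ [] := by rintro rfl; simp at hm
  have : 0 < text.length := List.length_pos_iff.mpr this
  simp only [List.length_drop]; omega

def replace_with_list_index (text : String) (lst : List String) : String :=
  String.ofList (pvLoopA text.toList lst [])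

-- ===== PORT B =====
-- B's single scan: walk the characters once; on '$' take the digit run, emit lst[num-1], skip it;
-- otherwise copy the character. (Source B's index walk with an output buffer, as structural recursion.)
def pvScanB (lst : List String) : List Char → List Char
  | [] => []
  | c :: rest =>
      if c = '$' then
        let ds := rest.takeWhile PySem.Chars.isdigit
        let num : Int := (PySem.Int.ofChars? ds).getD 0           -- int(text[i+1:j]); defaults outside Pre_
        ((PySem.List.pyGet? lst (num - 1)).getD "").toList ++ pvScanB lst (rest.drop ds.length)
      else c :: pvScanB lst rest
termination_by cs => cs.length
decreasing_by
  · simp only [List.length_drop, List.length_cons]; omega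
  · simp

def replace_with_list_index_alt (text : String) (lst : List String) : String :=
  String.ofList (pvScanB lst text.toList)

-- ===== PRECONDITION & SPEC =====
-- Pre_ excludes exactly the inputs on which Python A raises: a '$' followed by no digit
-- (int('') → ValueError) or whose digit run names an index outside lst (IndexError).
def Pre_replace_with_list_index (text : String) (lst : List String) : Prop :=
  ∀ i (h : i < text.toList.length), text.toList[i] = '$' →
    (text.toList.drop (i+1)).takeWhile PySem.Chars.isdigit ≠ [] ∧
    (PySem.List.pyGet? lst
      ((PySem.Int.ofChars? ((text.toList.drop (i+1)).takeWhile PySem.Chars.isdigit)).getD 0 - 1)).isSome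
instance (text : String) (lst : List String) : Decidable (Pre_replace_with_list_index text lst) := by
  unfold Pre_replace_with_list_index; infer_instance

def pvWitness_replace_with_list_index : String × List String := ("x$1y$2z", ["A", "B"])

def Spec_replace_with_list_index (text : String) (lst : List String) (out : String) : Prop := out = replace_with_list_index_alt text lst
instance (text : String) (lst : List String) (out : String) : Decidable (Spec_replace_with_list_index text lst out) := by unfold Spec_replace_with_list_index; infer_instance

-- ===== CLAIM (what is proved, stated in full; the proofs are below) =====
def Claim_equal_replace_with_list_index : Prop := ∀ (text : String) (lst : List String), Dom_replace_with_list_index text lst → Pre_replace_with_list_index text lst → Spec_replace_with_list_index text lst (replace_with_list_index text lst)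

-- ===== LEMMAS AND PROOFS =====
-- (the two ports agree on every input; Pre_ is only needed to match Python, where A raises)

theorem pvScanB_of_not_mem (lst : List String) (cs : List Char) (h : '$' ∉ cs) :
    pvScanB lst cs = cs := by
  induction cs with
  | nil => rw [pvScanB]
  | cons c rest ih =>
      rw [pvScanB]
      have hc : c ≠ '$' := fun hc => h (hc ▸ List.mem_cons_self)
      simp [hc, ih (fun hm => h (List.mem_cons_of_mem _ hm))]

theorem pvScanB_append (lst : List String) (pre rest : List Char) (h : '$' ∉ pre) :
    pvScanB lst (pre ++ rest) = pre ++ pvScanB lst rest := by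
  induction pre with
  | nil => simp
  | cons c p ih =>
      have hc : c ≠ '$' := fun hc => h (hc ▸ List.mem_cons_self)
      rw [List.cons_append, pvScanB]
      simp [hc, ih (fun hm => h (List.mem_cons_of_mem _ hm))]

theorem pvLoopA_eq_scanB (lst : List String) :
    ∀ n (cs : List Char), cs.length ≤ n → ∀ (result : List Char),
      pvLoopA cs lst result = result ++ pvScanB lst cs := by
  intro n
  induction n with
  | zero =>
      intro cs hlen result
      have : cs = [] := List.eq_nil_of_length_eq_zero (Nat.le_zero.mp hlen)
      subst this
      rw [pvLoopA, pvScanB]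
      simp [PySem.List.index?_eq_idxOf?]
  | succ n ih =>
      intro cs hlen result
      rw [pvLoopA]
      cases h : PySem.List.index? cs '$' with
      | none =>
          have hnm : '$' ∉ cs := (PySem.List.index?_eq_none_iff cs '$').mp h
          simp [pvScanB_of_not_mem lst cs hnm]
      | some i =>
          obtain ⟨pre, suf, hcs, hpre, hnot⟩ := (PySem.List.index?_eq_some_iff cs '$' i).mp h
          subst hcs
          have htake : (pre ++ '$' :: suf).take i = pre := by
            rw [← hpre]; simp
          have hdrop : (pre ++ '$' :: suf).drop (i + 1) = suf := by
            have : (pre ++ '$' :: suf) = (pre ++ ['$']) ++ suf := by simp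
            rw [this, ← hpre]
            simp
          set ds := (suf.takeWhile PySem.Chars.isdigit) with hds
          have hdrop2 : (pre ++ '$' :: suf).drop (i + 1 + ds.length) = suf.drop ds.length := by
            rw [← List.drop_drop, hdrop]
          have hlen2 : (suf.drop ds.length).length ≤ n := by
            have hL : (pre ++ '$' :: suf).length = pre.length + 1 + suf.length := by
              simp [List.length_append, List.length_cons]; omega
            simp only [List.length_drop]
            omega
          simp only [hdrop, hdrop2, htake, ← hds]
          rw [ih (suf.drop ds.length) hlen2]
          rw [pvScanB_append lst pre ('$' :: suf) hnot]
          rw [pvScanB]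
          simp [← hds]

-- ===== VERDICT (by name: the statement is the Claim_ definition above) =====
theorem replace_with_list_index_spec : Claim_equal_replace_with_list_index := by
  intro text lst _ _
  unfold Spec_replace_with_list_index replace_with_list_index replace_with_list_index_alt
  rw [pvLoopA_eq_scanB lst text.toList.length text.toList le_rfl []]
  rfl
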